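-- pv_equiv track=rewrite | github.com/JosephChataignon/hyperplanes-spectrum | isomorphisms.py | choseNextBranch
-- ===== SOURCE A (Python) =====
-- def choseNextBranch(branchesVisited,node,previousBranch,reverseOrder):
--     """
--     Returns the next branch that has not already been used in this direction,
--     at node node and coming from branch previousBranch.
--     Default order is clockwise, but if reverseOrder is true the order is
--     counter-clockwise.
--     """
--     started = False
--     for k in range( 2*len(branchesVisited[node]) + 1 ):
--         if reverseOrder:
--             k = -k
--         b = k % len(branchesVisited[node])
--         if started and (not branchesVisited[node][b]):
--             return b
--         if b == previousBranch:
--             started = True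
-- ===== SOURCE B (Python) =====
-- def choseNextBranch(branchesVisited, node, previousBranch, reverseOrder):
--     """Next-unvisited branch after previousBranch in circular order, computed
--     directly by offsets instead of A's 2n+1 scan with a 'started' sentinel."""
--     branches = branchesVisited[node]
--     n = len(branches)
--     if not (0 <= previousBranch < n):
--         return None
--     step = -1 if reverseOrder else 1
--     for offset in range(1, n + 1):
--         b = (previousBranch + step * offset) % n
--         if not branches[b]:
--             return b
--     return None
-- ===== Notes on version B (the rewrite author's own statement) =====
-- stated objective: simpler
-- what changed: B drops A's 2n+1-iteration scan with a 'started' sentinel and instead loops directly over the n offsets 1..n after previousBranch, returning the first (previousBranch + step*offset) % n whose flag is unvisited, with an up-front guard returning None when previousBranch is outside [0, n).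
import Mathlib
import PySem

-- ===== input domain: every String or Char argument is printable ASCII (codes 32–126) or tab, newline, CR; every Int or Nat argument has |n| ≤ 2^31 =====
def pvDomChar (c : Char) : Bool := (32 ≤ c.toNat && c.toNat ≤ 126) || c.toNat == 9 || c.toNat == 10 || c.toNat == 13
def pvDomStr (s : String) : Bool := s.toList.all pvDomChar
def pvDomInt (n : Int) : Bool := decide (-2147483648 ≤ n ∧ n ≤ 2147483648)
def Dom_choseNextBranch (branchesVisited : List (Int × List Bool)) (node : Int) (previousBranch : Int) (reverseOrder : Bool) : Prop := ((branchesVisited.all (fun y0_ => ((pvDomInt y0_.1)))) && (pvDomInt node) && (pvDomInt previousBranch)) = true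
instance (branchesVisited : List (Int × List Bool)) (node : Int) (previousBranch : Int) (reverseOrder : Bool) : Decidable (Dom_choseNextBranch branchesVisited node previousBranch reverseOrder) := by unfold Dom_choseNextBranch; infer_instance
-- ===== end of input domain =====

-- B replaces A's 2n+1-step scan with a 'started' sentinel by a direct loop over the n
-- offsets after previousBranch (simpler decomposition); equivalence is about the return value.

-- ===== PORT A =====
-- the for-loop of A: state = 'started'; at each k, compute b = (±k) % n, return b if
-- started and unvisited, then set started once b == previousBranch
def choseNextBranchAux (branches : List Bool) (previousBranch : Int) (reverseOrder : Bool) :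
    List Int → Bool → Option Int
  | [], _ => none
  | k :: ks, started =>
    let k' : Int := if reverseOrder then -k else k
    let b : Int := PySem.Int.mod k' (PySem.List.len branches)
    if started && !(PySem.List.pyGetD branches b false) then some b
    else choseNextBranchAux branches previousBranch reverseOrder ks
      (started || decide (b = previousBranch))

def choseNextBranch (branchesVisited : List (Int × List Bool)) (node : Int) (previousBranch : Int) (reverseOrder : Bool) : Option Int :=
  let branches := ((PySem.Dict.ofList branchesVisited).get? node).getD []
  choseNextBranchAux branches previousBranch reverseOrder
    (PySem.List.pyRange 0 (2 * PySem.List.len branches + 1) 1) false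

-- ===== PORT B =====
-- the for-loop of B: first offset in 1..n whose branch (prev + step*offset) % n is unvisited
def choseNextBranchAltLoop (branches : List Bool) (previousBranch step : Int) :
    List Int → Option Int
  | [] => none
  | off :: offs =>
    let b : Int := PySem.Int.mod (previousBranch + step * off) (PySem.List.len branches)
    if !(PySem.List.pyGetD branches b false) then some b
    else choseNextBranchAltLoop branches previousBranch step offs

def choseNextBranch_alt (branchesVisited : List (Int × List Bool)) (node : Int) (previousBranch : Int) (reverseOrder : Bool) : Option Int :=
  let branches := ((PySem.Dict.ofList branchesVisited).get? node).getD []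
  let n : Int := PySem.List.len branches
  if ¬ (0 ≤ previousBranch ∧ previousBranch < n) then none
  else
    let step : Int := if reverseOrder then -1 else 1
    choseNextBranchAltLoop branches previousBranch step (PySem.List.pyRange 1 (n + 1) 1)

-- ===== PRECONDITION & SPEC =====
-- Pre_ excludes exactly the inputs on which A raises: node absent from the dict (KeyError)
-- or its branch list empty (ZeroDivisionError from '% 0').
def Pre_choseNextBranch (branchesVisited : List (Int × List Bool)) (node : Int) (previousBranch : Int) (reverseOrder : Bool) : Prop :=
  ((PySem.Dict.ofList branchesVisited).get? node).getD [] ≠ []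

instance (branchesVisited : List (Int × List Bool)) (node : Int) (previousBranch : Int) (reverseOrder : Bool) : Decidable (Pre_choseNextBranch branchesVisited node previousBranch reverseOrder) := by unfold Pre_choseNextBranch; infer_instance

def pvWitness_choseNextBranch : (List (Int × List Bool)) × Int × Int × Bool :=
  ([(0, [true, false])], 0, 0, false)

def Spec_choseNextBranch (branchesVisited : List (Int × List Bool)) (node : Int) (previousBranch : Int) (reverseOrder : Bool) (out : Option Int) : Prop := out = choseNextBranch_alt branchesVisited node previousBranch reverseOrder
instance (branchesVisited : List (Int × List Bool)) (node : Int) (previousBranch : Int) (reverseOrder : Bool) (out : Option Int) : Decidable (Spec_choseNextBranch branchesVisited node previousBranch reverseOrder out) := by unfold Spec_choseNextBranch; infer_instance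

-- ===== CLAIM (what is proved, stated in full; the proofs are below) =====
def Claim_equal_choseNextBranch : Prop := ∀ (branchesVisited : List (Int × List Bool)) (node : Int) (previousBranch : Int) (reverseOrder : Bool), Dom_choseNextBranch branchesVisited node previousBranch reverseOrder → Pre_choseNextBranch branchesVisited node previousBranch reverseOrder → Spec_choseNextBranch branchesVisited node previousBranch reverseOrder (choseNextBranch branchesVisited node previousBranch reverseOrder)


-- ===== LEMMAS AND PROOFS =====

-- the body both loops test: 'some b' when branch b is unvisited, else 'none'
def pvF (branches : List Bool) (b : Int) : Option Int :=
  if !(PySem.List.pyGetD branches b false) then some b else none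

theorem aux_prefix (branches : List Bool) (p : Int) (rev : Bool) (l1 l2 : List Int)
    (h1 : ∀ k ∈ l1, PySem.Int.mod (if rev then -k else k) (branches.length : Int) ≠ p) :
    choseNextBranchAux branches p rev (l1 ++ l2) false
      = choseNextBranchAux branches p rev l2 false := by
  induction l1 with
  | nil => rfl
  | cons k ks ih =>
    have hk := h1 k (by simp)
    rw [show choseNextBranchAux branches p rev ((k :: ks) ++ l2) false
        = choseNextBranchAux branches p rev (ks ++ l2)
            (decide (PySem.Int.mod (if rev then -k else k) (branches.length : Int) = p)) from rfl,
      decide_eq_false hk]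
    exact ih (fun k hk => h1 k (by simp [hk]))

theorem aux_start (branches : List Bool) (p : Int) (rev : Bool) (k0 : Int) (l : List Int)
    (h : PySem.Int.mod (if rev then -k0 else k0) (branches.length : Int) = p) :
    choseNextBranchAux branches p rev (k0 :: l) false
      = choseNextBranchAux branches p rev l true := by
  rw [show choseNextBranchAux branches p rev (k0 :: l) false
      = choseNextBranchAux branches p rev l
          (decide (PySem.Int.mod (if rev then -k0 else k0) (branches.length : Int) = p)) from rfl,
    decide_eq_true h]

theorem aux_none (branches : List Bool) (p : Int) (rev : Bool) (ks : List Int)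
    (h1 : ∀ k ∈ ks, PySem.Int.mod (if rev then -k else k) (branches.length : Int) ≠ p) :
    choseNextBranchAux branches p rev ks false = none := by
  have h := aux_prefix branches p rev ks [] h1
  simpa using h

theorem aux_true (branches : List Bool) (p : Int) (rev : Bool) (ks : List Int) :
    choseNextBranchAux branches p rev ks true
      = ks.findSome? (fun k =>
          pvF branches (PySem.Int.mod (if rev then -k else k) (branches.length : Int))) := by
  induction ks with
  | nil => rfl
  | cons k ks ih =>
    rw [show choseNextBranchAux branches p rev (k :: ks) true
        = (if !(PySem.List.pyGetD branches
              (PySem.Int.mod (if rev then -k else k) (branches.length : Int)) false)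
           then some (PySem.Int.mod (if rev then -k else k) (branches.length : Int))
           else choseNextBranchAux branches p rev ks true) from rfl,
      List.findSome?_cons, ih]
    by_cases hv : PySem.List.pyGetD branches
        (PySem.Int.mod (if rev then -k else k) (branches.length : Int)) false = true
    · simp [pvF, hv]
    · simp [pvF, hv]

theorem alt_findSome (branches : List Bool) (p step : Int) (offs : List Int) :
    choseNextBranchAltLoop branches p step offs
      = offs.findSome? (fun j =>
          pvF branches (PySem.Int.mod (p + step * j) (branches.length : Int))) := by
  induction offs with
  | nil => rfl
  | cons j offs ih =>
    rw [show choseNextBranchAltLoop branches p step (j :: offs)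
        = (if !(PySem.List.pyGetD branches
              (PySem.Int.mod (p + step * j) (branches.length : Int)) false)
           then some (PySem.Int.mod (p + step * j) (branches.length : Int))
           else choseNextBranchAltLoop branches p step offs) from rfl,
      List.findSome?_cons, ih]
    by_cases hv : PySem.List.pyGetD branches
        (PySem.Int.mod (p + step * j) (branches.length : Int)) false = true
    · simp [pvF, hv]
    · simp [pvF, hv]

theorem findSome?_congr_mem {α β : Type} (l : List α) (f g : α → Option β)
    (h : ∀ x ∈ l, f x = g x) : l.findSome? f = l.findSome? g := by
  induction l with
  | nil => rfl
  | cons x xs ih =>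
    simp only [List.findSome?_cons, h x (by simp)]
    cases g x <;> simp [ih (fun y hy => h y (by simp [hy]))]

theorem neg_emod_emod (a n : Int) : (-(a % n)) % n = (-a) % n := by
  conv_rhs => rw [show -a = 0 - a by ring, Int.sub_emod]
  simp

theorem add_emod_absorb (a b n : Int) : (a + b % n) % n = (a + b) % n := by
  rw [Int.add_emod, Int.emod_emod_of_dvd _ dvd_rfl, ← Int.add_emod]

-- generic: findSome? over a shifted integer range
theorem findSome?_pyRange_shift (G : Int → Option Int) (a b c : Int) :
    (PySem.List.pyRange (a+c) (b+c) 1).findSome? (fun k => G (k - c))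
      = (PySem.List.pyRange a b 1).findSome? G := by
  rw [PySem.List.pyRange_one (a+c) (b+c), PySem.List.pyRange_one a b,
    List.findSome?_map, List.findSome?_map]
  rw [show b + c - (a + c) = b - a by ring]
  exact findSome?_congr_mem _ _ _ (fun i _ => by
    simp only [Function.comp_apply]
    rw [show a + c + (i : Int) - c = a + i by ring])

theorem main_equiv (branches : List Bool) (p : Int) (rev : Bool) (hne : branches ≠ []) :
    choseNextBranchAux branches p rev
      (PySem.List.pyRange 0 (2 * PySem.List.len branches + 1) 1) false
    = (if ¬ (0 ≤ p ∧ p < PySem.List.len branches) then none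
       else choseNextBranchAltLoop branches p (if rev then -1 else 1)
              (PySem.List.pyRange 1 (PySem.List.len branches + 1) 1)) := by
  have hn : (0:Int) < (branches.length : Int) := by
    exact_mod_cast List.length_pos_iff.mpr hne
  simp only [PySem.List.len_eq]
  have hmod : ∀ a : Int, PySem.Int.mod a (branches.length : Int) = a % (branches.length : Int) :=
    fun a => PySem.Int.mod_eq_emod_of_pos hn
  by_cases hp : 0 ≤ p ∧ p < (branches.length : Int)
  case neg =>
    rw [if_pos hp]
    apply aux_none
    intro k _
    rw [hmod]
    have h0 := Int.emod_nonneg (if rev then -k else k) (by omega : (branches.length : Int) ≠ 0)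
    have h1 := Int.emod_lt_of_pos (if rev then -k else k) hn
    omega
  case pos =>
    rw [if_neg (by simpa using hp)]
    set n : Int := (branches.length : Int) with hndef
    set k0 : Int := if rev then (-p) % n else p with hk0def
    have hk0 : 0 ≤ k0 ∧ k0 < n := by
      cases rev with
      | false => simpa [hk0def] using hp
      | true =>
        simp only [hk0def, if_true]
        exact ⟨Int.emod_nonneg _ (by omega), Int.emod_lt_of_pos _ hn⟩
    -- the scan first matches previousBranch exactly at index k0
    have hgk0 : PySem.Int.mod (if rev then -k0 else k0) n = p := by
      rw [hmod]
      cases rev with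
      | false => simpa [hk0def] using Int.emod_eq_of_lt hp.1 hp.2
      | true =>
        simp only [hk0def, if_true]
        rw [neg_emod_emod, neg_neg, Int.emod_eq_of_lt hp.1 hp.2]
    have hpref : ∀ k ∈ PySem.List.pyRange 0 k0 1,
        PySem.Int.mod (if rev then -k else k) n ≠ p := by
      intro k hkmem
      rw [PySem.List.mem_pyRange_one] at hkmem
      rw [hmod]
      cases rev with
      | false =>
        simp only [Bool.false_eq_true, if_false]
        rw [Int.emod_eq_of_lt (by omega) (by omega)]
        simp only [hk0def, Bool.false_eq_true, if_false] at hkmem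
        omega
      | true =>
        simp only [if_true]
        intro heq
        have hkk : k % n = k := Int.emod_eq_of_lt (by omega) (by omega)
        have hh : (-(-k)) % n = (-p) % n := by rw [← heq, neg_emod_emod]
        rw [neg_neg, hkk] at hh
        simp only [hk0def, if_true] at hkmem
        omega
    have h1 : PySem.List.pyRange 0 (2*n+1) 1
        = PySem.List.pyRange 0 k0 1 ++ PySem.List.pyRange k0 (2*n+1) 1 :=
      PySem.List.pyRange_one_append 0 k0 (2*n+1) (by omega) (by omega)
    have h2 : PySem.List.pyRange k0 (2*n+1) 1 = k0 :: PySem.List.pyRange (k0+1) (2*n+1) 1 :=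
      PySem.List.pyRange_one_cons (by omega)
    rw [h1, h2, aux_prefix branches p rev _ _ hpref, aux_start branches p rev k0 _ hgk0,
      aux_true, alt_findSome]
    simp only [← hndef, hmod]
    set G : Int → Option Int :=
      fun j => pvF branches ((p + (if rev then (-1:Int) else 1) * j) % n) with hGdef
    -- A's branch value at scan index k equals B's at offset k - k0
    have hbval : ∀ k ∈ PySem.List.pyRange (k0+1) (2*n+1) 1,
        (if rev then -k else k) % n = (p + (if rev then (-1:Int) else 1) * (k - k0)) % n := by
      intro k _
      cases rev with
      | false =>
        simp only [Bool.false_eq_true, if_false, hk0def]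
        rw [show p + 1 * (k - p) = k by ring]
      | true =>
        simp only [if_true, hk0def]
        rw [show p + -1 * (k - (-p) % n) = (p - k) + (-p) % n by ring,
          add_emod_absorb, show p - k + -p = -k by ring]
    have hcong := findSome?_congr_mem (PySem.List.pyRange (k0+1) (2*n+1) 1)
      (fun k => pvF branches ((if rev then -k else k) % n))
      (fun k => G (k - k0))
      (fun k hk => by
        simp only [hGdef]
        exact congrArg (pvF branches) (hbval k hk))
    rw [hcong, show (k0+1 : Int) = 1 + k0 by ring, show (2*n+1 : Int) = (2*n+1-k0) + k0 by ring,
      findSome?_pyRange_shift G 1 (2*n+1-k0) k0]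
    have hsplit2 : PySem.List.pyRange 1 (2*n+1-k0) 1
        = PySem.List.pyRange 1 (n+1) 1 ++ PySem.List.pyRange (n+1) (2*n+1-k0) 1 :=
      PySem.List.pyRange_one_append 1 (n+1) (2*n+1-k0) (by omega) (by omega)
    rw [hsplit2, List.findSome?_append]
    cases hfst : (PySem.List.pyRange 1 (n+1) 1).findSome? G with
    | some v => rfl
    | none =>
      simp only [Option.none_or]
      rw [List.findSome?_eq_none_iff] at hfst ⊢
      intro j hj
      rw [PySem.List.mem_pyRange_one] at hj
      -- one full period later the same branch values repeat
      have hper : (p + (if rev then (-1:Int) else 1) * j) % n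
          = (p + (if rev then (-1:Int) else 1) * (j - n)) % n := by
        rw [show p + (if rev then (-1:Int) else 1) * j
            = (p + (if rev then (-1:Int) else 1) * (j - n)) + n * (if rev then (-1:Int) else 1)
            by ring, Int.add_mul_emod_self_left]
      have hprev : G (j - n) = none := hfst (j - n) (by rw [PySem.List.mem_pyRange_one]; omega)
      simp only [hGdef] at hprev ⊢
      rw [hper]
      exact hprev

-- ===== VERDICT (by name: the statement is the Claim_ definition above) =====
theorem choseNextBranch_spec : Claim_equal_choseNextBranch := by
  intro bv node p rev _ hpre
  unfold Spec_choseNextBranch choseNextBranch choseNextBranch_alt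
  exact main_equiv _ p rev hpre
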